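-- pv_equiv track=rewrite | github.com/itsuitsuki/urnng_framed_tg | tg_model.py | generate_right_tree
-- ===== SOURCE A (Python) =====
-- def generate_right_tree(idx):
--     num = len(idx)
--     tree = ''
--     for i in range(num - 1):
--         tree += '( ' + str(i) + ' '
--     tree += str(num - 1) + ' '
--     for i in range(num - 1):
--         tree += ') '
--     return tree
-- ===== SOURCE B (Python) =====
-- def generate_right_tree(idx):
--     num = len(idx)
--
--     def opens(i, k):
--         # "( i ( i+1 ... ( i+k-1 " built by halving
--         if k <= 0:
--             return ''
--         if k == 1:
--             return '( ' + str(i) + ' '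
--         h = k // 2
--         return opens(i, h) + opens(i + h, k - h)
--
--     def closes(k):
--         # ") " repeated k times, built by halving
--         if k <= 0:
--             return ''
--         if k == 1:
--             return ') '
--         h = k // 2
--         return closes(h) + closes(k - h)
--
--     return opens(0, num - 1) + str(num - 1) + ' ' + closes(num - 1)
-- ===== Notes on version B (the rewrite author's own statement) =====
-- stated objective: alternative
-- what changed: Replaces A's two linear forward loops by a divide-and-conquer construction: the run of open brackets and the run of close brackets are each built by recursive halving (a log-depth tree of concatenations) instead of element-by-element appends.
import Mathlib
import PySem

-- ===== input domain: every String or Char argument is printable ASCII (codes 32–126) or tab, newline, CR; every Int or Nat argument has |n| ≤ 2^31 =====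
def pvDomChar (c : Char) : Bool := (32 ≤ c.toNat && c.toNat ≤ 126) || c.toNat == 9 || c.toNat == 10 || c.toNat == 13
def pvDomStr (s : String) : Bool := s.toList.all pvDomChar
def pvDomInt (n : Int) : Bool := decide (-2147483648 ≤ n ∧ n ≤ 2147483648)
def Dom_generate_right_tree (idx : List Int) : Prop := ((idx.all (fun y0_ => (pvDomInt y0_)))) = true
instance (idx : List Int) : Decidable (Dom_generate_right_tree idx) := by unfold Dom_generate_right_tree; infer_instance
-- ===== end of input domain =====

-- B replaces A's two linear forward loops by a divide-and-conquer construction: the open-bracket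
-- run and the close-bracket run are each built by recursive halving (alternative algorithm).


-- ===== PORT A =====
def generate_right_tree (idx : List Int) : String :=
  let num : Int := idx.length
  let tree : String := ""
  let tree := (PySem.List.pyRange 0 (num - 1)).foldl
    (fun s i => s ++ ("( " ++ PySem.Int.toStr i ++ " ")) tree
  let tree := tree ++ (PySem.Int.toStr (num - 1) ++ " ")
  let tree := (PySem.List.pyRange 0 (num - 1)).foldl (fun s _ => s ++ ") ") tree
  tree

-- ===== PORT B =====
-- "( i ( i+1 ... ( i+k-1 " built by halving; fuel only makes the recursion structural
-- (fuel = k.toNat always suffices: each call at least halves k, so depth ≤ k)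
def grtOpens (fuel : Nat) (i k : Int) : String :=
  match fuel with
  | 0 => ""
  | fuel + 1 =>
    if k ≤ 0 then ""
    else if k = 1 then "( " ++ PySem.Int.toStr i ++ " "
    else
      let h := PySem.Int.floordiv k 2
      grtOpens fuel i h ++ grtOpens fuel (i + h) (k - h)

-- ") " repeated k times, built by halving (same fuel discipline)
def grtCloses (fuel : Nat) (k : Int) : String :=
  match fuel with
  | 0 => ""
  | fuel + 1 =>
    if k ≤ 0 then ""
    else if k = 1 then ") "
    else
      let h := PySem.Int.floordiv k 2
      grtCloses fuel h ++ grtCloses fuel (k - h)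

def generate_right_tree_alt (idx : List Int) : String :=
  let num : Int := idx.length
  grtOpens num.toNat 0 (num - 1) ++ PySem.Int.toStr (num - 1) ++ " " ++ grtCloses num.toNat (num - 1)

-- ===== PRECONDITION & SPEC =====
def Spec_generate_right_tree (idx : List Int) (out : String) : Prop := out = generate_right_tree_alt idx
instance (idx : List Int) (out : String) : Decidable (Spec_generate_right_tree idx out) := by unfold Spec_generate_right_tree; infer_instance

-- ===== CLAIM =====
def Claim_equal_generate_right_tree : Prop := ∀ (idx : List Int), Dom_generate_right_tree idx → Spec_generate_right_tree idx (generate_right_tree idx)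

-- ===== LEMMAS AND PROOFS =====

-- k copies of ") "
def grtRep : Nat → String
  | 0 => ""
  | k + 1 => ") " ++ grtRep k

theorem grt_rep_add (a b : Nat) : grtRep (a + b) = grtRep a ++ grtRep b := by
  induction a with
  | zero =>
    rw [Nat.zero_add]
    exact String.empty_append.symm
  | succ a ih =>
    have h : a + 1 + b = (a + b) + 1 := by omega
    rw [h]
    show ") " ++ grtRep (a + b) = (") " ++ grtRep a) ++ grtRep b
    rw [ih, String.append_assoc]

-- pulling the seed string out of a left fold that only appends on the right
theorem grt_foldl_pull {α : Type} (f : α → String) (l : List α) (a b : String) :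
    l.foldl (fun s x => s ++ f x) (a ++ b) = a ++ l.foldl (fun s x => s ++ f x) b := by
  induction l generalizing b with
  | nil => rfl
  | cons x l ih =>
    simp only [List.foldl_cons]
    rw [String.append_assoc, ih]

theorem grt_foldl_seed {α : Type} (f : α → String) (l : List α) (a : String) :
    l.foldl (fun s x => s ++ f x) a = a ++ l.foldl (fun s x => s ++ f x) "" := by
  have := grt_foldl_pull f l a ""
  simpa using this

-- the append-fold, written as a right fold of the mapped pieces
theorem grt_foldl_concat {α : Type} (f : α → String) (l : List α) :
    l.foldl (fun s x => s ++ f x) "" = (l.map f).foldr (· ++ ·) "" := by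
  induction l with
  | nil => rfl
  | cons x l ih =>
    simp only [List.foldl_cons, List.map_cons, List.foldr_cons]
    have hz : ("" : String) ++ f x = f x := rfl
    rw [hz, grt_foldl_seed f l (f x), ih]

theorem grt_close_rep (l : List Int) :
    l.foldl (fun s _ => s ++ ") ") "" = grtRep l.length := by
  induction l with
  | nil => rfl
  | cons x l ih =>
    simp only [List.foldl_cons]
    have hz : ("" : String) ++ ") " = ") " := rfl
    rw [hz, grt_foldl_seed (fun _ => ") ") l ") ", ih]
    rfl

theorem grt_foldr_init (l : List String) (b : String) :
    l.foldr (· ++ ·) b = l.foldr (· ++ ·) "" ++ b := by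
  induction l with
  | nil => simp
  | cons x l ih =>
    simp only [List.foldr_cons, ih]
    simp [String.append_assoc]

-- the canonical open-bracket run over a range
def grtO (i k : Int) : String :=
  ((PySem.List.pyRange i (i + k)).map (fun j => "( " ++ PySem.Int.toStr j ++ " ")).foldr (· ++ ·) ""

theorem grt_O_split (i a b : Int) (ha : 0 ≤ a) (hb : 0 ≤ b) :
    grtO i (a + b) = grtO i a ++ grtO (i + a) b := by
  unfold grtO
  rw [PySem.List.pyRange_one_append i (i + a) (i + (a + b)) (by omega) (by omega)]
  have hab : i + (a + b) = (i + a) + b := by ring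
  rw [hab, List.map_append, List.foldr_append, grt_foldr_init]

theorem grt_opens_char : ∀ (fuel : Nat) (i k : Int), k.toNat ≤ fuel → grtOpens fuel i k = grtO i k := by
  intro fuel
  induction fuel with
  | zero =>
    intro i k hk
    unfold grtO
    rw [PySem.List.pyRange_one_eq_nil (by omega)]
    rfl
  | succ fuel ih =>
    intro i k hk
    show (if k ≤ 0 then "" else if k = 1 then _ else _) = _
    by_cases h0 : k ≤ 0
    · rw [if_pos h0]
      unfold grtO
      rw [PySem.List.pyRange_one_eq_nil (by omega)]
      rfl
    · rw [if_neg h0]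
      by_cases h1 : k = 1
      · rw [if_pos h1, h1]
        unfold grtO
        rw [PySem.List.pyRange_one_singleton]
        simp
      · rw [if_neg h1]
        have hd : PySem.Int.floordiv k 2 = k / 2 := PySem.Int.floordiv_eq_ediv_of_pos (by omega)
        simp only [hd]
        rw [ih i (k / 2) (by omega), ih (i + k / 2) (k - k / 2) (by omega)]
        have hsum : k = k / 2 + (k - k / 2) := by omega
        calc grtO i (k / 2) ++ grtO (i + k / 2) (k - k / 2)
            = grtO i (k / 2 + (k - k / 2)) := (grt_O_split i (k / 2) (k - k / 2) (by omega) (by omega)).symm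
          _ = grtO i k := by rw [← hsum]

theorem grt_closes_char : ∀ (fuel : Nat) (k : Int), k.toNat ≤ fuel → grtCloses fuel k = grtRep k.toNat := by
  intro fuel
  induction fuel with
  | zero =>
    intro k hk
    have : k.toNat = 0 := by omega
    rw [this]
    rfl
  | succ fuel ih =>
    intro k hk
    show (if k ≤ 0 then "" else if k = 1 then _ else _) = _
    by_cases h0 : k ≤ 0
    · rw [if_pos h0]
      have : k.toNat = 0 := by omega
      rw [this]
      rfl
    · rw [if_neg h0]
      by_cases h1 : k = 1
      · rw [if_pos h1, h1]
        rfl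
      · rw [if_neg h1]
        have hd : PySem.Int.floordiv k 2 = k / 2 := PySem.Int.floordiv_eq_ediv_of_pos (by omega)
        simp only [hd]
        rw [ih (k / 2) (by omega), ih (k - k / 2) (by omega)]
        rw [← grt_rep_add]
        congr 1
        omega

-- ===== VERDICT =====
theorem generate_right_tree_spec : Claim_equal_generate_right_tree := by
  intro idx _
  unfold Spec_generate_right_tree generate_right_tree generate_right_tree_alt
  simp only []
  generalize ((idx.length : Int)) = n
  -- A side
  rw [grt_foldl_seed (fun _ => ") ") (PySem.List.pyRange 0 (n - 1))]
  rw [grt_close_rep, PySem.List.length_pyRange_one, grt_foldl_concat]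
  -- B side
  rw [grt_opens_char n.toNat 0 (n - 1) (by omega),
      grt_closes_char n.toNat (n - 1) (by omega)]
  unfold grtO
  rw [zero_add]
  have h10 : (n - 1 - 0 : Int) = n - 1 := by ring
  rw [h10]
  simp [String.append_assoc]
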